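-- pv_equiv track=rewrite | github.com/Aminazine/h-w-and-practice | hw10.11.16.py | sum_num_of_pow
-- ===== SOURCE A (Python) =====
-- def sum_num_of_pow(n):
--     pow = 0
--     sum = 0
--     for i in range(0,1000000):
--         if i == n**pow:
--             pow = pow + 1
--             sum = sum + i
--     return sum
-- ===== SOURCE B (Python) =====
-- def sum_num_of_pow(n):
--     # Sum the powers n**0, n**1, ... that lie below 1,000,000, by iterating
--     # the powers directly instead of scanning every integer up to 1,000,000.
--     if n <= 1:
--         # the increasing scan only ever hits the zeroth power
--         return 1
--     total = 0
--     v = 1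
--     while v < 1000000:
--         total += v
--         v *= n
--     return total
-- ===== Notes on version B (the rewrite author's own statement) =====
-- stated objective: faster
-- what changed: B iterates the geometric sequence of powers of n directly (about log n steps) instead of scanning all 1,000,000 integers and testing each against the current power.
import Mathlib
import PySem

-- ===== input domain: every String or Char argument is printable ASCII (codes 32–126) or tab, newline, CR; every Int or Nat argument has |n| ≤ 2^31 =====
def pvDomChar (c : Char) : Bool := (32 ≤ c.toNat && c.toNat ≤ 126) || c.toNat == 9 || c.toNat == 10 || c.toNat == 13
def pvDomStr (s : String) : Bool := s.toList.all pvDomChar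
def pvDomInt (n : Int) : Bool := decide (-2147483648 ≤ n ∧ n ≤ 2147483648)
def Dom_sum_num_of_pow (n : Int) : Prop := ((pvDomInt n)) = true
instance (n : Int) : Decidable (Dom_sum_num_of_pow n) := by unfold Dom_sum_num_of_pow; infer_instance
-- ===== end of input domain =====

-- B sums the powers of n below 1,000,000 directly (geometric iteration) instead of
-- scanning all 1,000,000 integers; same return value, asymptotically faster.

-- ===== PORT A =====
-- A's loop 'for i in range(0,1000000): if i == n**pow: pow += 1; sum += i', written as
-- recursion on the loop counter i (exact on every iteration; i runs 0,1,…,999999)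
def aLoop (n i : Int) (pow : Nat) (sum : Int) : Int :=
  if _h : i < 1000000 then
    if i = n ^ pow then aLoop n (i + 1) (pow + 1) (sum + i)
    else aLoop n (i + 1) pow sum
  else sum
termination_by (1000000 - i).toNat
decreasing_by all_goals omega

def sum_num_of_pow (n : Int) : Int := aLoop n 0 0 0

-- ===== PORT B =====
-- Source B's while loop; the fuel argument only makes the recursion total
-- (20 iterations always suffice since 2^20 > 1000000 and the loop runs for n ≥ 2 only)
def altLoop : Nat → Int → Int → Int → Int
  | 0, _, _, total => total
  | fuel + 1, n, v, total => if v < 1000000 then altLoop fuel n (v * n) (total + v) else total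

def sum_num_of_pow_alt (n : Int) : Int :=
  if n ≤ 1 then 1 else altLoop 20 n 1 0

-- ===== PRECONDITION & SPEC =====
def Spec_sum_num_of_pow (n : Int) (out : Int) : Prop := out = sum_num_of_pow_alt n
instance (n : Int) (out : Int) : Decidable (Spec_sum_num_of_pow n out) := by unfold Spec_sum_num_of_pow; infer_instance

-- ===== CLAIM (what is proved, stated in full; the proofs are below) =====
def Claim_equal_sum_num_of_pow : Prop := ∀ (n : Int), Dom_sum_num_of_pow n → Spec_sum_num_of_pow n (sum_num_of_pow n)

-- ===== LEMMAS AND PROOFS =====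

-- the scan is the identity once the current target n^pow can never occur again
theorem aLoop_id (n a : Int) (p : Nat) (s : Int) (h : ∀ j : Int, a ≤ j → j ≠ n ^ p) :
    aLoop n a p s = s := by
  rw [aLoop.eq_def]
  by_cases hlt : a < 1000000
  · rw [dif_pos hlt, if_neg (h a le_rfl)]
    exact aLoop_id n (a + 1) p s (fun j hj => h j (by omega))
  · rw [dif_neg hlt]
termination_by (1000000 - a).toNat
decreasing_by omega

-- the scan from a skips unchanged forward to the current target t = n^p
theorem aLoop_hop (n a t : Int) (p : Nat) (s : Int) (ht : t = n ^ p) (ha : a ≤ t) :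
    aLoop n a p s = aLoop n t p s := by
  by_cases hat : a = t
  · rw [hat]
  · conv_lhs => rw [aLoop.eq_def]
    by_cases hlt : a < 1000000
    · rw [dif_pos hlt, if_neg (by rw [← ht]; exact hat)]
      exact aLoop_hop n (a + 1) t p s ht (by omega)
    · rw [dif_neg hlt]
      conv_rhs => rw [aLoop.eq_def]
      rw [dif_neg (by omega)]
termination_by (1000000 - a).toNat
decreasing_by omega

-- one step of the scan at the current target t = n^p
theorem aLoop_skip (n t : Int) (p : Nat) (s : Int) (ht : t = n ^ p) :
    aLoop n t p s = if t < 1000000 then aLoop n (t + 1) (p + 1) (s + t) else s := by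
  conv_lhs => rw [aLoop.eq_def]
  by_cases hlt : t < 1000000
  · rw [dif_pos hlt, if_pos ht, if_pos hlt]
  · rw [dif_neg hlt, if_neg hlt]

-- main invariant: starting the scan at the current target n^p, A's scan computes B's loop
theorem aLoop_eq_altLoop (n : Int) (h2 : 2 ≤ n) :
    ∀ (fuel p : Nat) (s : Int), (1000000 : Int) ≤ n ^ (p + fuel) →
    aLoop n (n ^ p) p s = altLoop fuel n (n ^ p) s := by
  intro fuel
  induction fuel with
  | zero =>
    intro p s hbig
    have hp : (1000000 : Int) ≤ n ^ p := by simpa using hbig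
    rw [aLoop_skip n (n ^ p) p s rfl, if_neg (by omega)]
    rfl
  | succ fuel ih =>
    intro p s hbig
    have hp1 : (1 : Int) ≤ n ^ p := one_le_pow₀ (by omega)
    rw [aLoop_skip n (n ^ p) p s rfl]
    by_cases hv : n ^ p < 1000000
    · rw [if_pos hv]
      have hmono : n ^ p + 1 ≤ n ^ (p + 1) := by
        have hs : n ^ (p + 1) = n ^ p * n := pow_succ n p
        nlinarith
      rw [aLoop_hop n (n ^ p + 1) (n ^ (p + 1)) (p + 1) (s + n ^ p) rfl hmono]
      rw [ih (p + 1) (s + n ^ p) (by rw [show p + 1 + fuel = p + (fuel + 1) from by omega]; exact hbig)]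
      simp only [altLoop]
      rw [if_pos hv, pow_succ]
    · rw [if_neg hv]
      simp only [altLoop]
      rw [if_neg hv]

-- for n ≤ 1 the scan only ever matches i = 1 = n^0; afterwards the target n ≤ 1 < i never occurs
theorem sum_A_of_le_one (n : Int) (hn : n ≤ 1) : sum_num_of_pow n = 1 := by
  show aLoop n 0 0 0 = 1
  conv_lhs => rw [aLoop.eq_def]
  rw [dif_pos (show (0 : Int) < 1000000 by norm_num), if_neg (by simp)]
  rw [show (0 : Int) + 1 = 1 from rfl]
  conv_lhs => rw [aLoop.eq_def]
  rw [dif_pos (show (1 : Int) < 1000000 by norm_num), if_pos (by simp)]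
  rw [show (0 : Int) + 1 = 1 from rfl]
  exact aLoop_id n (1 + 1) 1 1 (fun j hj => by
    have hp : n ^ 1 = n := pow_one n
    omega)

theorem sum_A_of_ge_two (n : Int) (hn : 2 ≤ n) : sum_num_of_pow n = altLoop 20 n 1 0 := by
  show aLoop n 0 0 0 = altLoop 20 n 1 0
  conv_lhs => rw [aLoop.eq_def]
  rw [dif_pos (show (0 : Int) < 1000000 by norm_num), if_neg (by simp)]
  rw [show (0 : Int) + 1 = 1 from rfl]
  have hb : (1000000 : Int) ≤ n ^ (0 + 20) := by
    calc (1000000 : Int) ≤ 2 ^ 20 := by norm_num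
    _ ≤ n ^ 20 := pow_le_pow_left₀ (by norm_num) hn 20
  have e := aLoop_eq_altLoop n hn 20 0 0 hb
  rw [pow_zero] at e
  exact e

-- ===== VERDICT (by name: the statement is the Claim_ definition above) =====
theorem sum_num_of_pow_spec : Claim_equal_sum_num_of_pow := by
  intro n _
  show sum_num_of_pow n = sum_num_of_pow_alt n
  by_cases hn : n ≤ 1
  · have halt : sum_num_of_pow_alt n = 1 := by
      rw [sum_num_of_pow_alt, if_pos hn]
    exact (sum_A_of_le_one n hn).trans halt.symm
  · have halt : sum_num_of_pow_alt n = altLoop 20 n 1 0 := by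
      rw [sum_num_of_pow_alt, if_neg hn]
    exact (sum_A_of_ge_two n (by omega)).trans halt.symm
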